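-- pv_equiv track=rewrite | github.com/dvjn/aoc2024 | day01/part2.py | solve
-- ===== SOURCE A (Python) =====
-- def solve(l1: list, l2: list) -> int:
--     similarity_score = 0
--
--     l2_counts: dict[int, int] = {}
--     for y in l2:
--         if y in l2_counts:
--             l2_counts[y] += 1
--         else:
--             l2_counts[y] = 1
--
--     for x in l1:
--         if x in l2_counts:
--             similarity_score += x * l2_counts[x]
--
--     return similarity_score
-- ===== SOURCE B (Python) =====
-- def solve(l1: list, l2: list) -> int:
--     s = sorted(l2)
--
--     def lower(x):
--         lo, hi = 0, len(s)
--         while lo < hi: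
--             mid = (lo + hi) // 2
--             if s[mid] < x:
--                 lo = mid + 1
--             else:
--                 hi = mid
--         return lo
--
--     def upper(x):
--         lo, hi = 0, len(s)
--         while lo < hi:
--             mid = (lo + hi) // 2
--             if s[mid] <= x:
--                 lo = mid + 1
--             else:
--                 hi = mid
--         return lo
--
--     total = 0
--     for x in l1:
--         total += x * (upper(x) - lower(x))
--     return total
-- ===== Notes on version B (the rewrite author's own statement) =====
-- stated objective: alternative
-- what changed: Replaces A's build-a-count-dict-then-lookup strategy with sort-then-binary-search: l2 is sorted once and each x's multiplicity is obtained as upper(x) - lower(x) via two hand-written binary searches over the sorted list.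
import Mathlib
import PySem

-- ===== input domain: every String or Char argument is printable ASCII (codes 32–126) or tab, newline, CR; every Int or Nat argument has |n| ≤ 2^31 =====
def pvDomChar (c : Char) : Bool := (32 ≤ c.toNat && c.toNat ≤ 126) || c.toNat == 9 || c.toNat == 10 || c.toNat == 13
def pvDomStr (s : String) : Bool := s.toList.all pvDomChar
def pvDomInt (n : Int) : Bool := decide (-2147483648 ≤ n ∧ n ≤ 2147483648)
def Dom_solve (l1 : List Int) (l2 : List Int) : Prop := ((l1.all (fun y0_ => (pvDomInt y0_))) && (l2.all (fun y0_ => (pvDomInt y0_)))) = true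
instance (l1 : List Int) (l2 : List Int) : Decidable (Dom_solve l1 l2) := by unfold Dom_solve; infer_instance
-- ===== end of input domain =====

-- B replaces A's counting dict with sort-then-binary-search: l2 is sorted once and each
-- x's multiplicity is upper(x) - lower(x) from two hand-written binary searches (alternative algorithm, not claimed faster).


-- ===== PORT A =====
-- Builds the counts dict with the same if-contains branch as A, then sums with the guard.
def solve (l1 : List Int) (l2 : List Int) : Int :=
  let l2_counts : PySem.Dict Int Int :=
    l2.foldl (fun d y =>
      if d.contains y then d.insert y (d.getD y 0 + 1) else d.insert y 1)
      PySem.Dict.empty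
  l1.foldl (fun acc x =>
    if l2_counts.contains x then acc + x * l2_counts.getD x 0 else acc) 0

-- ===== PORT B =====
-- lower(x): while lo < hi: mid = (lo+hi)//2; if s[mid] < x: lo = mid+1 else hi = mid
-- (indices stay inside s while lo < hi ≤ len s, so s[mid] is ported as getD mid 0)
def lowerGo (s : List Int) (x : Int) (lo hi : Nat) : Nat :=
  if lo < hi then
    if s.getD ((lo + hi) / 2) 0 < x then lowerGo s x ((lo + hi) / 2 + 1) hi
    else lowerGo s x lo ((lo + hi) / 2)
  else lo
termination_by hi - lo
decreasing_by all_goals omega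

-- upper(x): same loop with the test s[mid] <= x
def upperGo (s : List Int) (x : Int) (lo hi : Nat) : Nat :=
  if lo < hi then
    if s.getD ((lo + hi) / 2) 0 ≤ x then upperGo s x ((lo + hi) / 2 + 1) hi
    else upperGo s x lo ((lo + hi) / 2)
  else lo
termination_by hi - lo
decreasing_by all_goals omega

def solve_alt (l1 : List Int) (l2 : List Int) : Int :=
  let s := PySem.List.sorted l2 (fun y => y) false
  l1.foldl (fun total x =>
    total + x * ((upperGo s x 0 s.length : Int) - (lowerGo s x 0 s.length : Int))) 0

-- ===== PRECONDITION & SPEC =====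
def Spec_solve (l1 : List Int) (l2 : List Int) (out : Int) : Prop := out = solve_alt l1 l2
instance (l1 : List Int) (l2 : List Int) (out : Int) : Decidable (Spec_solve l1 l2 out) := by unfold Spec_solve; infer_instance

-- ===== CLAIM =====
def Claim_equal_solve : Prop := ∀ (l1 : List Int) (l2 : List Int), Dom_solve l1 l2 → Spec_solve l1 l2 (solve l1 l2)

-- ===== LEMMAS AND PROOFS =====

-- A's hand-built counts dict is PySem's counter.
theorem buildDict_eq_counter (l2 : List Int) :
    l2.foldl (fun d y =>
      if d.contains y then d.insert y (d.getD y 0 + 1) else d.insert y 1)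
      PySem.Dict.empty = PySem.Dict.counter l2 := by
  rw [← PySem.Dict.foldl_insert_getD_add_one_eq_counter]
  congr 1
  funext d y
  by_cases h : d.contains y
  · simp [h]
  · rw [if_neg h, PySem.Dict.getD_of_not_contains d 0 (by simpa using h)]; norm_num

-- A's summing loop equals the loop summing x * count l2 x over l1.
theorem solve_eq_count_sum (l1 l2 : List Int) :
    solve l1 l2 = l1.foldl (fun acc x => acc + x * (l2.count x : Int)) 0 := by
  have h1 : solve l1 l2 = l1.foldl (fun acc x =>
      if (PySem.Dict.counter l2).contains x then acc + x * (PySem.Dict.counter l2).getD x 0 else acc) 0 := by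
    unfold solve
    rw [buildDict_eq_counter]
  rw [h1]
  congr 1
  funext acc x
  by_cases h : (PySem.Dict.counter l2).contains x
  · simp [h, PySem.Dict.getD_counter]
  · have hc : l2.count x = 0 := by
      rw [PySem.Dict.contains_counter] at h
      simp only [List.contains_eq_mem, decide_eq_true_eq] at h
      exact List.count_eq_zero.mpr h
    simp [h, hc]

-- The binary-search loop lands on any boundary N separating (< x) from (not < x).
theorem lowerGo_eq (s : List Int) (x : Int) (N : Nat)
    (hlow : ∀ j, j < N → s.getD j 0 < x)
    (hhigh : ∀ j, N ≤ j → j < s.length → ¬ s.getD j 0 < x)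
    (lo hi : Nat) (h1 : lo ≤ N) (h2 : N ≤ hi) (h3 : hi ≤ s.length) :
    lowerGo s x lo hi = N := by
  rw [lowerGo]
  by_cases h : lo < hi
  · rw [if_pos h]
    by_cases hm : s.getD ((lo + hi) / 2) 0 < x
    · rw [if_pos hm]
      have hmidN : (lo + hi) / 2 < N := by
        by_contra hc
        exact hhigh _ (Nat.le_of_not_lt hc) (by omega) hm
      exact lowerGo_eq s x N hlow hhigh _ hi (by omega) h2 h3
    · rw [if_neg hm]
      have hNmid : N ≤ (lo + hi) / 2 := by
        by_contra hc
        exact hm (hlow _ (Nat.lt_of_not_le hc))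
      exact lowerGo_eq s x N hlow hhigh lo _ h1 (by omega) (by omega)
  · rw [if_neg h]; omega
termination_by hi - lo
decreasing_by all_goals omega

theorem upperGo_eq (s : List Int) (x : Int) (N : Nat)
    (hlow : ∀ j, j < N → s.getD j 0 ≤ x)
    (hhigh : ∀ j, N ≤ j → j < s.length → ¬ s.getD j 0 ≤ x)
    (lo hi : Nat) (h1 : lo ≤ N) (h2 : N ≤ hi) (h3 : hi ≤ s.length) :
    upperGo s x lo hi = N := by
  rw [upperGo]
  by_cases h : lo < hi
  · rw [if_pos h]
    by_cases hm : s.getD ((lo + hi) / 2) 0 ≤ x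
    · rw [if_pos hm]
      have hmidN : (lo + hi) / 2 < N := by
        by_contra hc
        exact hhigh _ (Nat.le_of_not_lt hc) (by omega) hm
      exact upperGo_eq s x N hlow hhigh _ hi (by omega) h2 h3
    · rw [if_neg hm]
      have hNmid : N ≤ (lo + hi) / 2 := by
        by_contra hc
        exact hm (hlow _ (Nat.lt_of_not_le hc))
      exact upperGo_eq s x N hlow hhigh lo _ h1 (by omega) (by omega)
  · rw [if_neg h]; omega
termination_by hi - lo
decreasing_by all_goals omega

-- On a sorted list the two searches compute bisect_left and bisect_right.
theorem lowerGo_eq_bisectLeft (s : List Int) (x : Int)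
    (hs : s.Pairwise (· ≤ ·)) :
    lowerGo s x 0 s.length = PySem.List.bisectLeft s x := by
  obtain ⟨hle, hlt, hge⟩ := PySem.List.bisectLeft_spec s x hs
  apply lowerGo_eq s x _ ?_ ?_ 0 s.length (by omega) hle le_rfl
  · intro j hj
    have hjl : j < s.length := by omega
    rw [List.getD_eq_getElem s 0 hjl]
    exact hlt j hjl hj
  · intro j hNj hjl
    rw [List.getD_eq_getElem s 0 hjl]
    exact not_lt.mpr (hge j hjl hNj)

theorem upperGo_eq_bisectRight (s : List Int) (x : Int)
    (hs : s.Pairwise (· ≤ ·)) :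
    upperGo s x 0 s.length = PySem.List.bisectRight s x := by
  obtain ⟨hle, hlt, hge⟩ := PySem.List.bisectRight_spec s x hs
  apply upperGo_eq s x _ ?_ ?_ 0 s.length (by omega) hle le_rfl
  · intro j hj
    have hjl : j < s.length := by omega
    rw [List.getD_eq_getElem s 0 hjl]
    exact hlt j hjl hj
  · intro j hNj hjl
    rw [List.getD_eq_getElem s 0 hjl]
    exact not_le.mpr (hge j hjl hNj)

-- Number of indices below n lying in [L, R).
theorem count_range_Ico (L R n : Nat) :
    ((List.range n).filter (fun j => decide (L ≤ j ∧ j < R))).length = min R n - min L n := by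
  induction n with
  | zero => simp
  | succ n ih =>
    rw [List.range_succ, List.filter_append, List.length_append, ih]
    have hone : (List.filter (fun j => decide (L ≤ j ∧ j < R)) [n]).length
        = if L ≤ n ∧ n < R then 1 else 0 := by
      by_cases h : L ≤ n ∧ n < R <;> simp [h]
    rw [hone]
    split_ifs with h <;> omega

-- On a sorted list, bisect_right - bisect_left = count.
theorem bisect_sub_eq_count (s : List Int) (x : Int)
    (hs : s.Pairwise (· ≤ ·)) :
    (PySem.List.bisectRight s x : Int) - (PySem.List.bisectLeft s x : Int) = (s.count x : Int) := by
  obtain ⟨hRle, hRlt, hRge⟩ := PySem.List.bisectRight_spec s x hs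
  obtain ⟨hLle, hLlt, hLge⟩ := PySem.List.bisectLeft_spec s x hs
  set L := PySem.List.bisectLeft s x with hL
  set R := PySem.List.bisectRight s x with hR
  have hLR : L ≤ R := by
    by_contra hc
    push_neg at hc
    have h1 := hLlt R (by omega) hc
    have h2 := hRge R (by omega) le_rfl
    omega
  have hiff : ∀ j (hj : j < s.length), (s[j] = x ↔ L ≤ j ∧ j < R) := by
    intro j hj
    constructor
    · intro he
      constructor
      · by_contra hcon; push_neg at hcon
        have := hLlt j hj hcon; omega
      · by_contra hcon; push_neg at hcon
        have := hRge j hj hcon; omega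
    · intro ⟨h1, h2⟩
      have ha := hLge j hj h1
      have hb := hRlt j hj h2
      omega
  have hsc : s = List.map (fun j => s.getD j 0) (List.range s.length) := by
    apply List.ext_getElem
    · simp
    · intro i h1 h2
      simp only [List.getElem_map, List.getElem_range]
      rw [List.getD_eq_getElem s 0 h1]
  have hcount : s.count x = R - L := by
    rw [List.count_eq_length_filter]
    conv_lhs => rw [hsc]
    rw [List.filter_map, List.length_map]
    rw [List.filter_congr (q := fun j => decide (L ≤ j ∧ j < R)) ?_]
    · rw [count_range_Ico]
      omega
    · intro j hj
      simp only [List.mem_range] at hj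
      simp only [Function.comp]
      rw [List.getD_eq_getElem s 0 hj]
      rw [show (s[j] == x) = decide (s[j] = x) from rfl]
      simp only [decide_eq_decide]
      exact hiff j hj
  omega

-- ===== VERDICT =====
theorem solve_spec : Claim_equal_solve := by
  intro l1 l2 _
  unfold Spec_solve solve_alt
  simp only []
  rw [solve_eq_count_sum]
  have hs : (PySem.List.sorted l2 (fun y => y) false).Pairwise (· ≤ ·) := by
    simpa using PySem.List.sorted_pairwise (xs := l2) (key := fun y => y)
  have hperm : (PySem.List.sorted l2 (fun y => y) false).Perm l2 :=
    PySem.List.sorted_perm l2 (fun y => y) false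
  congr 1
  funext total x
  rw [lowerGo_eq_bisectLeft _ x hs, upperGo_eq_bisectRight _ x hs,
    bisect_sub_eq_count _ x hs, hperm.count_eq]
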